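-- pv_equiv track=rewrite | github.com/Pooky112/Baekjoon | 프로그래머스/0/181874. A 강조하기/A 강조하기.py | solution
-- ===== SOURCE A (Python) =====
-- def solution(myString):
--     ans = ''
--     for c in myString:
--         if c == 'a':
--             ans += 'A'
--         elif c != 'A' and c.isupper():
--             ans += c.lower()
--         else:
--             ans += c
--
--     return ans
--
--     "myString.lower().replace('a', 'A')"
-- ===== SOURCE B (Python) =====
-- _TABLE = str.maketrans('a' + 'BCDEFGHIJKLMNOPQRSTUVWXYZ',
--                        'A' + 'bcdefghijklmnopqrstuvwxyz')
--
--
-- def solution(myString):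
--     return myString.translate(_TABLE)
-- ===== Notes on version B (the rewrite author's own statement) =====
-- stated objective: idiomatic
-- what changed: Replaces the per-character if/elif branching loop with a translation table built once via str.maketrans and a single myString.translate call.
import Mathlib
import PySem

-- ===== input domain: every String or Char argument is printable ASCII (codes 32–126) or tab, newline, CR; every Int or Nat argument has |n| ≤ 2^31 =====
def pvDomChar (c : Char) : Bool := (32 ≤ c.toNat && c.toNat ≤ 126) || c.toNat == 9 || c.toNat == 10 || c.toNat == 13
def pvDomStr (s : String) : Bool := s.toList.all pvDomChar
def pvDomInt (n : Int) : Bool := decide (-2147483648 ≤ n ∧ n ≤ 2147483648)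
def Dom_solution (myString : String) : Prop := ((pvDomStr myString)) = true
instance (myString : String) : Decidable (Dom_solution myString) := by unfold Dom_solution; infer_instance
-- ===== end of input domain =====

-- B builds a character translation table once (str.maketrans) and maps it over the string, instead of A's per-character if/elif loop; idiomatic, same O(n) cost.


-- ===== PORT A =====
-- loop over the characters, appending the translated character to the accumulator string
def solution (myString : String) : String :=
  String.ofList (myString.toList.foldl (fun ans c =>
    if c = 'a' then ans ++ ['A']
    else if c ≠ 'A' ∧ PySem.Chars.isupper c = true then ans ++ [PySem.Chars.lowerChar c]
    else ans ++ [c]) [])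

-- ===== PORT B =====
-- the str.maketrans table: 'a' ↦ 'A' and 'B'..'Z' ↦ their lowercase counterparts
def pvPairs : List (Char × Char) :=
  ('a', 'A') :: (List.range 25).map (fun i => (Char.ofNat (66 + i), Char.ofNat (98 + i)))

-- str.translate: look the character up in the table, keep it if absent
def pvTranslate : List (Char × Char) → Char → Char
  | [], c => c
  | (k, v) :: rest, c => if c = k then v else pvTranslate rest c

def solution_alt (myString : String) : String :=
  String.ofList (myString.toList.map (pvTranslate pvPairs))

-- ===== PRECONDITION & SPEC =====
def Spec_solution (myString : String) (out : String) : Prop := out = solution_alt myString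
instance (myString : String) (out : String) : Decidable (Spec_solution myString out) := by unfold Spec_solution; infer_instance

-- ===== CLAIM (what is proved, stated in full; the proofs are below) =====
def Claim_equal_solution : Prop := ∀ (myString : String), Dom_solution myString → Spec_solution myString (solution myString)

-- ===== LEMMAS AND PROOFS =====

-- A's per-character branch
def pvBranch (c : Char) : Char :=
  if c = 'a' then 'A'
  else if c ≠ 'A' ∧ PySem.Chars.isupper c = true then PySem.Chars.lowerChar c
  else c

theorem pvTranslate_not_mem (l : List (Char × Char)) (c : Char)
    (h : ∀ p ∈ l, c ≠ p.1) : pvTranslate l c = c := by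
  induction l with
  | nil => rfl
  | cons p rest ih =>
    obtain ⟨k, v⟩ := p
    simp only [pvTranslate]
    rw [if_neg (h (k, v) (List.mem_cons_self ..)), ih (fun q hq => h q (List.mem_cons_of_mem _ hq))]

theorem pvBranch_eq (c : Char) : pvBranch c = pvTranslate pvPairs c := by
  by_cases ha : c = 'a'
  · subst ha; decide
  · by_cases hU : c ≠ 'A' ∧ PySem.Chars.isupper c = true
    · -- c is one of 'B'..'Z'
      have h1 : 66 ≤ c.toNat ∧ c.toNat ≤ 90 := by
        obtain ⟨hne, hup⟩ := hU
        simp only [PySem.Chars.isupper, Bool.and_eq_true, decide_eq_true_eq] at hup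
        have hl : 65 ≤ c.toNat := hup.1
        have hr : c.toNat ≤ 90 := hup.2
        have : c.toNat ≠ 65 := by
          intro h
          apply hne
          have := Char.ofNat_toNat c
          rw [h] at this
          exact this.symm
        omega
      have hc : c = Char.ofNat c.toNat := (Char.ofNat_toNat c).symm
      rw [show pvBranch c = PySem.Chars.lowerChar c by
            simp [pvBranch, if_neg ha, if_pos hU]]
      rw [hc]
      obtain ⟨hl, hr⟩ := h1
      interval_cases h : c.toNat <;> decide
    · -- c is untouched by both versions
      have hres : pvBranch c = c := by simp [pvBranch, if_neg ha, if_neg hU]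
      rw [hres]
      refine (pvTranslate_not_mem pvPairs c ?_).symm
      intro p hp
      simp only [pvPairs, List.mem_cons, List.mem_map, List.mem_range] at hp
      rcases hp with rfl | ⟨i, hi, rfl⟩
      · exact ha
      · interval_cases i <;> (rintro rfl; exact hU (by decide))

theorem pvFold_eq (l : List Char) (acc : List Char) :
    l.foldl (fun ans c =>
      if c = 'a' then ans ++ ['A']
      else if c ≠ 'A' ∧ PySem.Chars.isupper c = true then ans ++ [PySem.Chars.lowerChar c]
      else ans ++ [c]) acc = acc ++ l.map (pvTranslate pvPairs) := by
  induction l generalizing acc with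
  | nil => simp
  | cons c rest ih =>
    simp only [List.foldl_cons, List.map_cons, ih]
    rw [show (if c = 'a' then acc ++ ['A']
        else if c ≠ 'A' ∧ PySem.Chars.isupper c = true then acc ++ [PySem.Chars.lowerChar c]
        else acc ++ [c]) = acc ++ [pvBranch c] by
      unfold pvBranch; split_ifs <;> rfl]
    rw [pvBranch_eq]
    simp

-- ===== VERDICT (by name: the statement is the Claim_ definition above) =====
theorem solution_spec : Claim_equal_solution := by
  intro s _
  unfold Spec_solution solution solution_alt
  rw [pvFold_eq]
  simp
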